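-- pv_equiv track=rewrite | github.com/pypi-data/pypi-mirror-351 | packages/spark-memory/spark_memory-0.1.2-py3-none-any.whl/migration/verification/access_verifier.py | _determine_actual_access
-- ===== SOURCE A (Python) =====
-- from typing import Dict, List, Optional, Set, Tuple, Any
-- from enum import Enum
--
-- class AccessLevel(str, Enum):
--     """Access levels for memory resources."""
--     NONE = "none"
--     READ = "read"
--     WRITE = "write"
--     ADMIN = "admin"
--
-- def _determine_actual_access(commands: List[str]) -> AccessLevel:
--     """Determine actual access level from commands."""
--     if "all" in commands or "flushdb" in commands:
--         return AccessLevel.ADMIN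
--     elif any(cmd in commands for cmd in ["set", "del"]):
--         return AccessLevel.WRITE
--     elif any(cmd in commands for cmd in ["get", "mget"]):
--         return AccessLevel.READ
--     return AccessLevel.NONE
-- ===== SOURCE B (Python) =====
-- from typing import Dict, List, Optional, Set, Tuple, Any
-- from enum import Enum
--
-- class AccessLevel(str, Enum):
--     """Access levels for memory resources."""
--     NONE = "none"
--     READ = "read"
--     WRITE = "write"
--     ADMIN = "admin"
--
-- _RANK = {"all": 3, "flushdb": 3, "set": 2, "del": 2, "get": 1, "mget": 1}
-- _LEVEL = (AccessLevel.NONE, AccessLevel.READ, AccessLevel.WRITE, AccessLevel.ADMIN)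
--
-- def _determine_actual_access(commands: List[str]) -> AccessLevel:
--     """Determine actual access level from commands (single max-rank pass)."""
--     best = 0
--     for cmd in commands:
--         r = _RANK.get(cmd, 0)
--         if r > best:
--             best = r
--     return _LEVEL[best]
-- ===== Notes on version B (the rewrite author's own statement) =====
-- stated objective: alternative
-- what changed: Replaced the ordered cascade of membership scans over the command list with a single accumulating pass that keeps the maximum numeric rank per command (via a rank dict) and maps the final rank to the access level.
import Mathlib
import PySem

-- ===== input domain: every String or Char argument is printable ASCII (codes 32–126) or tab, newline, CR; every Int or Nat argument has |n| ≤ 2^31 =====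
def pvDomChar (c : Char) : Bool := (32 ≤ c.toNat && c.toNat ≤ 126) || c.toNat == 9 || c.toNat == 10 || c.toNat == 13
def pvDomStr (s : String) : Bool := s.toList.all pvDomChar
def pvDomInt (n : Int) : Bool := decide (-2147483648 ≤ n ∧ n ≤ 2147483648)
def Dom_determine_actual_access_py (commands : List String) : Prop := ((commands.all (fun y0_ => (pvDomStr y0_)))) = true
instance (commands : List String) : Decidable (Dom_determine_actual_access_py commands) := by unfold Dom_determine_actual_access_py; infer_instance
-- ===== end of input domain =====

-- B replaces A's ordered cascade of membership scans with one accumulating max-rank pass; objective: alternative (same cost).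
-- AccessLevel is a str-valued Enum; its members are rendered as their String values ("none"/"read"/"write"/"admin").

-- ===== PORT A =====
def determine_actual_access_py (commands : List String) : String :=
  if commands.contains "all" || commands.contains "flushdb" then "admin"
  else if (["set", "del"] : List String).any (fun cmd => commands.contains cmd) then "write"
  else if (["get", "mget"] : List String).any (fun cmd => commands.contains cmd) then "read"
  else "none"

-- ===== PORT B =====
-- _RANK dict literal (keys inserted in order)
def pvRankDict : PySem.Dict String Int :=
  ((((((PySem.Dict.empty).insert "all" 3).insert "flushdb" 3).insert "set" 2).insert
      "del" 2).insert "get" 1).insert "mget" 1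

def determine_actual_access_py_alt (commands : List String) : String :=
  let best := commands.foldl (fun b cmd =>
    let r := pvRankDict.getD cmd 0
    if r > b then r else b) 0
  -- _LEVEL[best]: tuple indexing; best is always one of 0,1,2,3
  if best = 0 then "none"
  else if best = 1 then "read"
  else if best = 2 then "write"
  else "admin"

-- ===== PRECONDITION & SPEC =====
def Spec_determine_actual_access_py (commands : List String) (out : String) : Prop := out = determine_actual_access_py_alt commands
instance (commands : List String) (out : String) : Decidable (Spec_determine_actual_access_py commands out) := by unfold Spec_determine_actual_access_py; infer_instance

-- ===== CLAIM (what is proved, stated in full; the proofs are below) =====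
def Claim_equal_determine_actual_access_py : Prop := ∀ (commands : List String), Dom_determine_actual_access_py commands → Spec_determine_actual_access_py commands (determine_actual_access_py commands)

-- ===== LEMMAS AND PROOFS =====

def pvRnk (c : String) : Int := pvRankDict.getD c 0

def pvStep (b : Int) (c : String) : Int :=
  let r := pvRnk c
  if r > b then r else b

def pvSup (cs : List String) : Int := cs.foldl pvStep 0

theorem pvRnk_eq (c : String) :
    pvRnk c = if c = "all" then 3 else if c = "flushdb" then 3 else if c = "set" then 2
      else if c = "del" then 2 else if c = "get" then 1 else if c = "mget" then 1 else 0 := by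
  simp [pvRnk, pvRankDict, PySem.Dict.getD_insert, PySem.Dict.getD_empty]
  split_ifs <;> simp_all

theorem pvRnk_nonneg (c : String) : 0 ≤ pvRnk c := by
  rw [pvRnk_eq]; split_ifs <;> norm_num

theorem pvStep_eq_max (b : Int) (c : String) : pvStep b c = max b (pvRnk c) := by
  simp only [pvStep, max_def]
  split_ifs <;> omega

theorem pvFoldl_step (cs : List String) : ∀ b : Int, 0 ≤ b →
    cs.foldl pvStep b = max b (pvSup cs) := by
  induction cs with
  | nil => intro b hb; simp [pvSup]; omega
  | cons c cs ih =>
    intro b hb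
    have hr := pvRnk_nonneg c
    have h1 : List.foldl pvStep (pvStep b c) cs = max (pvStep b c) (pvSup cs) :=
      ih _ (by rw [pvStep_eq_max]; exact le_max_of_le_left hb)
    have h2 : pvSup (c :: cs) = max (pvRnk c) (pvSup cs) := by
      show List.foldl pvStep (pvStep 0 c) cs = _
      rw [ih _ (by rw [pvStep_eq_max]; exact le_max_of_le_right hr), pvStep_eq_max]
      rw [max_eq_right hr]
    rw [List.foldl_cons, h1, pvStep_eq_max, h2, max_assoc]

theorem pvSup_cons (c : String) (cs : List String) :
    pvSup (c :: cs) = max (pvRnk c) (pvSup cs) := by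
  show List.foldl pvStep (pvStep 0 c) cs = _
  rw [pvFoldl_step cs _ (by rw [pvStep_eq_max]; exact le_max_of_le_right (pvRnk_nonneg c)),
    pvStep_eq_max, max_eq_right (pvRnk_nonneg c)]

theorem pvSup_nonneg (cs : List String) : 0 ≤ pvSup cs := by
  induction cs with
  | nil => simp [pvSup]
  | cons c cs ih => rw [pvSup_cons]; exact le_max_of_le_right ih

theorem pvSup_le_three (cs : List String) : pvSup cs ≤ 3 := by
  induction cs with
  | nil => simp [pvSup]
  | cons c cs ih =>
    rw [pvSup_cons]
    have : pvRnk c ≤ 3 := by rw [pvRnk_eq]; split_ifs <;> norm_num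
    exact max_le this ih

theorem pvSup_ge_iff (t : Int) (ht : 1 ≤ t) (cs : List String) :
    t ≤ pvSup cs ↔ ∃ c ∈ cs, t ≤ pvRnk c := by
  induction cs with
  | nil => simp [pvSup]; omega
  | cons c cs ih => rw [pvSup_cons, le_max_iff, ih]; simp

theorem pvRnk_ge_three (c : String) : 3 ≤ pvRnk c ↔ c = "all" ∨ c = "flushdb" := by
  rw [pvRnk_eq]; split_ifs <;> simp_all

theorem pvRnk_ge_two (c : String) :
    2 ≤ pvRnk c ↔ c = "all" ∨ c = "flushdb" ∨ c = "set" ∨ c = "del" := by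
  rw [pvRnk_eq]; split_ifs <;> simp_all

theorem pvRnk_ge_one (c : String) :
    1 ≤ pvRnk c ↔ c = "all" ∨ c = "flushdb" ∨ c = "set" ∨ c = "del" ∨ c = "get" ∨ c = "mget" := by
  rw [pvRnk_eq]; split_ifs <;> simp_all

-- ===== VERDICT (by name: the statement is the Claim_ definition above) =====
theorem determine_actual_access_py_spec : Claim_equal_determine_actual_access_py := by
  intro cs _
  unfold Spec_determine_actual_access_py determine_actual_access_py determine_actual_access_py_alt
  have hb : (cs.foldl (fun b cmd =>
      let r := pvRankDict.getD cmd 0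
      if r > b then r else b) 0) = pvSup cs := rfl
  rw [hb]
  have h0 := pvSup_nonneg cs
  have h3l := pvSup_le_three cs
  have h3 : (3 ≤ pvSup cs) ↔ ("all" ∈ cs ∨ "flushdb" ∈ cs) := by
    rw [pvSup_ge_iff 3 (by norm_num)]
    simp only [pvRnk_ge_three]
    constructor
    · rintro ⟨c, hc, rfl | rfl⟩ <;> [exact Or.inl hc; exact Or.inr hc]
    · rintro (h | h) <;> exact ⟨_, h, by simp⟩
  have h2 : (2 ≤ pvSup cs) ↔ ("all" ∈ cs ∨ "flushdb" ∈ cs ∨ "set" ∈ cs ∨ "del" ∈ cs) := by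
    rw [pvSup_ge_iff 2 (by norm_num)]
    simp only [pvRnk_ge_two]
    constructor
    · rintro ⟨c, hc, rfl | rfl | rfl | rfl⟩ <;> tauto
    · rintro (h | h | h | h) <;> exact ⟨_, h, by simp⟩
  have h1 : (1 ≤ pvSup cs) ↔
      ("all" ∈ cs ∨ "flushdb" ∈ cs ∨ "set" ∈ cs ∨ "del" ∈ cs ∨ "get" ∈ cs ∨ "mget" ∈ cs) := by
    rw [pvSup_ge_iff 1 (by norm_num)]
    simp only [pvRnk_ge_one]
    constructor
    · rintro ⟨c, hc, rfl | rfl | rfl | rfl | rfl | rfl⟩ <;> tauto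
    · rintro (h | h | h | h | h | h) <;> exact ⟨_, h, by simp⟩
  simp only [Bool.or_eq_true, List.contains_eq_mem, decide_eq_true_eq, List.any_cons,
    List.any_nil, Bool.or_false]
  split_ifs with c1 c2 c3 b0 b1 b2 b0 b1 b2 b0 b1 b2 <;>
    simp_all <;> omega
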